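-- pv_equiv track=rewrite | github.com/bewest/rag-nightscout-ecosystem-alignment | tools/cgmencode/production/exp_effective_cr_2609.py | _classify_time_block
-- ===== SOURCE A (Python) =====
-- TIME_BLOCKS = {
--     "dawn": (4, 10),
--     "day": (10, 16),
--     "evening": (16, 22),
--     "overnight": (22, 4),
-- }
--
-- def _classify_time_block(hour):
--     """Classify hour into time block."""
--     for name, (start, end) in TIME_BLOCKS.items():
--         if start < end:
--             if start <= hour < end:
--                 return name
--         else:  # overnight wraps
--             if hour >= start or hour < end:
--                 return name
--     return "day"
-- ===== SOURCE B (Python) =====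
-- _BLOCK_NAMES = ("overnight", "dawn", "day", "evening", "overnight")
--
-- def _classify_time_block(hour):
--     """Classify hour into time block."""
--     return _BLOCK_NAMES[(hour >= 4) + (hour >= 10) + (hour >= 16) + (hour >= 22)]
-- ===== Notes on version B (the rewrite author's own statement) =====
-- stated objective: alternative
-- what changed: Replaced the dict-driven loop of range tests with branch-free arithmetic indexing: the block index is the count of boundaries (4,10,16,22) not exceeding the hour, looked up in a fixed name table.
import Mathlib
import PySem

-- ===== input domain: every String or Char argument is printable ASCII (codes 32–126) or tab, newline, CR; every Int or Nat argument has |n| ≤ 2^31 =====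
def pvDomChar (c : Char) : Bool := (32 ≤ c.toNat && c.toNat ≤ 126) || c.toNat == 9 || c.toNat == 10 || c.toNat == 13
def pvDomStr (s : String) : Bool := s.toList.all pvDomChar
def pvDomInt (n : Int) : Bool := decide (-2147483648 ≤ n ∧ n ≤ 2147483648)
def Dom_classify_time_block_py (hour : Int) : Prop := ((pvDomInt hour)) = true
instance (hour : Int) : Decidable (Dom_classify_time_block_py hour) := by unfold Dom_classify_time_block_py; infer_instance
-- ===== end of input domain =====

-- B replaces A's dict-and-loop of range tests with a branch-free table lookup indexed by the count of boundaries ≤ hour (alternative algorithm, same values).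


-- ===== PORT A =====
-- Port of A: structural recursion over the TIME_BLOCKS items list, branches in order.
def classifyLoop (hour : Int) : List (String × Int × Int) → String
  | [] => "day"
  | (name, start, stop) :: rest =>
    if start < stop then
      if start ≤ hour ∧ hour < stop then name else classifyLoop hour rest
    else
      if hour ≥ start ∨ hour < stop then name else classifyLoop hour rest

def TIME_BLOCKS : List (String × Int × Int) :=
  [("dawn", 4, 10), ("day", 10, 16), ("evening", 16, 22), ("overnight", 22, 4)]

def classify_time_block_py (hour : Int) : String := classifyLoop hour TIME_BLOCKS

-- ===== PORT B =====
-- Port of B: branch-free table lookup, index = count of boundaries ≤ hour.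
def BLOCK_NAMES : List String := ["overnight", "dawn", "day", "evening", "overnight"]

def classify_time_block_py_alt (hour : Int) : String :=
  ((PySem.List.pyGet? BLOCK_NAMES
      ((if hour ≥ 4 then (1:Int) else 0) + (if hour ≥ 10 then 1 else 0) +
       (if hour ≥ 16 then 1 else 0) + (if hour ≥ 22 then 1 else 0))).getD "day")

-- ===== PRECONDITION & SPEC =====
def Spec_classify_time_block_py (hour : Int) (out : String) : Prop := out = classify_time_block_py_alt hour
instance (hour : Int) (out : String) : Decidable (Spec_classify_time_block_py hour out) := by unfold Spec_classify_time_block_py; infer_instance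

-- ===== CLAIM (what is proved, stated in full; the proofs are below) =====
def Claim_equal_classify_time_block_py : Prop := ∀ (hour : Int), Dom_classify_time_block_py hour → Spec_classify_time_block_py hour (classify_time_block_py hour)

-- ===== LEMMAS AND PROOFS =====

-- ===== VERDICT (by name: the statement is the Claim_ definition above) =====
set_option maxHeartbeats 1000000 in
theorem classify_time_block_py_spec : Claim_equal_classify_time_block_py := by
  intro hour _
  unfold Spec_classify_time_block_py classify_time_block_py classify_time_block_py_alt TIME_BLOCKS BLOCK_NAMES
  simp only [classifyLoop]
  split_ifs <;> first | rfl | omega
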